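-- pv_equiv track=rewrite | github.com/yayqwer/NULdelevop | project/gram/json_to_xlsx.py | merger_index
-- ===== SOURCE A (Python) =====
-- def merger_index(index_list):
--     """
--     :return:index range of the merged columns
--     """
--     merger_index = []
--     root = 2
--     d_merger_root = 'A' + str(root)
--     merger_start = d_merger_root
--     for item in index_list:
--         __end_numb = root + item - 1
--         merger_end = 'A' + str(__end_numb)
--         merger_index.append([merger_start, merger_end])
--         root = __end_numb + 1
--         merger_start = 'A' + str(root)
--     return merger_index
-- ===== SOURCE B (Python) =====
-- def merger_index(index_list):
--     # prefix sums first, then a pure mapping pass over the cumulative list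
--     cum = []
--     s = 0
--     for x in index_list:
--         s += x
--         cum.append(s)
--     return [['A' + str(2 + (cum[i - 1] if i else 0)), 'A' + str(1 + cum[i])]
--             for i in range(len(cum))]
-- ===== Notes on version B (the rewrite author's own statement) =====
-- stated objective: alternative
-- what changed: Replaces the running root/merger_start accumulator with an explicit prefix-sum list built first, then a separate index-mapping pass that derives each [start,end] pair from neighbouring cumulative sums.
import Mathlib
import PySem

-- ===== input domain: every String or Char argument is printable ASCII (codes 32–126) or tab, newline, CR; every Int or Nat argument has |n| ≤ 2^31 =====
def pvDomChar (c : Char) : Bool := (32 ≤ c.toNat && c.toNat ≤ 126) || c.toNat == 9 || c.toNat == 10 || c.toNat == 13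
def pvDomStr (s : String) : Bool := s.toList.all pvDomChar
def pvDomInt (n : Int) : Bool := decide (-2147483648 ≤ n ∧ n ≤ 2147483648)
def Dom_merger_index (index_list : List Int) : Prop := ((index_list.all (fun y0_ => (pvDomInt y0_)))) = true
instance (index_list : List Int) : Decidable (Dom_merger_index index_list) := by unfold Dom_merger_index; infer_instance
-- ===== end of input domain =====

-- B builds the prefix-sum list first, then maps indices to pairs; A keeps a running root/start accumulator. Same values, different decomposition (objective: alternative).

-- ===== PORT A =====
-- state: (merger_index, root, merger_start)
def merger_index (index_list : List Int) : List (List String) :=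
  (index_list.foldl
    (fun (st : List (List String) × Int × String) item =>
      let endn := st.2.1 + item - 1
      (st.1 ++ [[st.2.2, "A" ++ PySem.Int.toStr endn]],
       endn + 1,
       "A" ++ PySem.Int.toStr (endn + 1)))
    ([], 2, "A" ++ PySem.Int.toStr 2)).1

-- ===== PORT B =====
-- first pass: cum = prefix sums (list + running sum, as in Source B)
def merger_index_alt (index_list : List Int) : List (List String) :=
  let cum := (index_list.foldl (fun (p : List Int × Int) x => (p.1 ++ [p.2 + x], p.2 + x)) ([], 0)).1
  (List.range cum.length).map (fun i =>
    ["A" ++ PySem.Int.toStr (2 + (if i = 0 then 0 else cum.getD (i - 1) 0)),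
     "A" ++ PySem.Int.toStr (1 + cum.getD i 0)])

-- ===== PRECONDITION & SPEC =====
def Spec_merger_index (index_list : List Int) (out : List (List String)) : Prop := out = merger_index_alt index_list
instance (index_list : List Int) (out : List (List String)) : Decidable (Spec_merger_index index_list out) := by unfold Spec_merger_index; infer_instance

-- ===== CLAIM (what is proved, stated in full; the proofs are below) =====
def Claim_equal_merger_index : Prop := ∀ (index_list : List Int), Dom_merger_index index_list → Spec_merger_index index_list (merger_index index_list)

-- ===== LEMMAS AND PROOFS =====

-- common reference: the list both programs compute, parametrised by the running root
def mergerSpec (r : Int) : List Int → List (List String)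
  | [] => []
  | x :: xs => ["A" ++ PySem.Int.toStr r, "A" ++ PySem.Int.toStr (r + x - 1)] :: mergerSpec (r + x) xs

lemma fold_a_eq (l : List Int) : ∀ (acc : List (List String)) (r : Int),
    (l.foldl
      (fun (st : List (List String) × Int × String) item =>
        let endn := st.2.1 + item - 1
        (st.1 ++ [[st.2.2, "A" ++ PySem.Int.toStr endn]],
         endn + 1,
         "A" ++ PySem.Int.toStr (endn + 1)))
      (acc, r, "A" ++ PySem.Int.toStr r)).1 = acc ++ mergerSpec r l := by
  induction l with
  | nil => intro acc r; simp [mergerSpec]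
  | cons x xs ih =>
    intro acc r
    have h : r + x - 1 + 1 = r + x := by omega
    simp only [List.foldl_cons, mergerSpec]
    rw [h, ih]
    simp

-- prefix sums with seed s
def psum (s : Int) : List Int → List Int
  | [] => []
  | x :: xs => (s + x) :: psum (s + x) xs

lemma fold_b_eq (l : List Int) : ∀ (acc : List Int) (s : Int),
    (l.foldl (fun (p : List Int × Int) x => (p.1 ++ [p.2 + x], p.2 + x)) (acc, s)).1
      = acc ++ psum s l := by
  induction l with
  | nil => intro acc s; simp [psum]
  | cons x xs ih =>
    intro acc s
    simp only [List.foldl_cons, psum]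
    rw [ih]
    simp

lemma map_psum_eq (l : List Int) : ∀ (p : Int),
    (List.range (psum p l).length).map (fun i =>
      ["A" ++ PySem.Int.toStr (2 + (if i = 0 then p else (psum p l).getD (i - 1) 0)),
       "A" ++ PySem.Int.toStr (1 + (psum p l).getD i 0)])
      = mergerSpec (2 + p) l := by
  induction l with
  | nil => intro p; simp [psum, mergerSpec]
  | cons x xs ih =>
    intro p
    have hr : List.range ((psum p (x :: xs)).length)
        = 0 :: (List.range (psum (p + x) xs).length).map Nat.succ := by
      simp [psum, List.range_succ_eq_map]
    rw [hr]
    simp only [List.map_cons, List.map_map, mergerSpec]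
    refine List.cons_eq_cons.mpr ⟨?_, ?_⟩
    · -- head
      simp only [psum, List.getD_cons_zero]
      refine congrArg (fun t => ["A" ++ PySem.Int.toStr (2 + p), "A" ++ PySem.Int.toStr t]) ?_
      omega
    · -- tail: pointwise equal to IH's function
      rw [show (2 : Int) + p + x = 2 + (p + x) by omega, ← ih (p + x)]
      apply List.map_congr_left
      intro i _
      simp only [Function.comp]
      refine congrArg₂ (fun a b => ["A" ++ PySem.Int.toStr a, "A" ++ PySem.Int.toStr b]) ?_ ?_
      · cases i with
        | zero => simp [psum]
        | succ j => simp [psum]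
      · cases i with
        | zero => simp [psum]
        | succ j => simp [psum]

-- ===== VERDICT (by name: the statement is the Claim_ definition above) =====
theorem merger_index_spec : Claim_equal_merger_index := by
  intro l _
  unfold Spec_merger_index merger_index merger_index_alt
  rw [fold_a_eq l [] 2, fold_b_eq l [] 0]
  simpa using (map_psum_eq l 0).symm
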